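-- pv_equiv track=rewrite | github.com/arty-hlr/CTF-writeups | 2019/adventofcode/8/solve1.py | find_min_zeros
-- ===== SOURCE A (Python) =====
-- def count(image,i,target):
--     count = 0
--     layer = image[i*25*6:(i+1)*25*6]
--     for n in layer:
--         if n == target:
--             count += 1
--     return count
--
-- def find_min_zeros(image):
--     m = 25*6*100
--     index = None
--     for i in range(100):
--         zeros = count(image,i,0)
--         if zeros < m:
--             m = zeros
--             index = i
--     return index
-- ===== SOURCE B (Python) =====
-- def find_min_zeros(image):
--     counts = [0] * 100
--     for idx, n in enumerate(image):
--         layer = idx // 150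
--         if layer < 100 and n == 0:
--             counts[layer] += 1
--     return counts.index(min(counts))
-- ===== Notes on version B (the rewrite author's own statement) =====
-- stated objective: alternative
-- what changed: B replaces A's per-layer slicing with a nested counting loop and a running strict-minimum tracker by one flat enumerate pass over the pixels that builds a 100-entry zero-count table keyed by idx//150, followed by min()+list.index() for the first argmin; no slicing and no per-layer inner loop remain.
import Mathlib
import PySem

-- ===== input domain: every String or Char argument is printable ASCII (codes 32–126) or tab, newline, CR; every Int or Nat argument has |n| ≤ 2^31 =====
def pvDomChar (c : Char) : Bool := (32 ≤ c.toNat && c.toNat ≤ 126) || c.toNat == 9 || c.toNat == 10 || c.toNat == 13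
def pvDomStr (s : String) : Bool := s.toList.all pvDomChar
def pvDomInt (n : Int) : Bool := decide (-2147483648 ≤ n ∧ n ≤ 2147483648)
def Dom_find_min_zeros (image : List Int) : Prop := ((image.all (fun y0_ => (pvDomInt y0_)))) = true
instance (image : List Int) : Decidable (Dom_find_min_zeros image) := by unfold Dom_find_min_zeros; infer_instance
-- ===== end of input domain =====

-- B replaces A's per-layer slicing + inner counting loop + running minimum by ONE flat
-- enumerate pass building a 100-entry zero-count table keyed by idx // 150, then min()+index();
-- alternative decomposition, same cost.

-- ===== PORT A =====
-- A's helper `count(image, i, target)`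
def countHelper (image : List Int) (i : Int) (target : Int) : Int :=
  let layer := PySem.List.slice image (some (i * 25 * 6)) (some ((i + 1) * 25 * 6))
  layer.foldl (fun c n => if n == target then c + 1 else c) 0

def find_min_zeros (image : List Int) : Option Int :=
  let st := (PySem.List.pyRange 0 100 1).foldl
    (fun (s : Int × Option Int) i =>
      let zeros := countHelper image i 0
      if zeros < s.1 then (zeros, some i) else s)
    (25 * 6 * 100, none)
  st.2

-- ===== PORT B =====
-- loop body of Source B's flat pass: `layer = idx // 150; if layer < 100 and n == 0: counts[layer] += 1`
-- (idx comes from enumerate so 0 ≤ idx; under the guard layer.toNat < 100 = len(counts), so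
--  getD/set are exactly Python's in-range counts[layer] read/write)
def stepB (cs : List Int) (p : Int × Int) : List Int :=
  let layer := PySem.Int.floordiv p.1 150
  if layer < 100 ∧ p.2 = 0 then cs.set layer.toNat (cs.getD layer.toNat 0 + 1) else cs

def find_min_zeros_alt (image : List Int) : Option Int :=
  let counts := (PySem.List.enumerate image 0).foldl stepB (List.replicate 100 (0 : Int))
  (PySem.List.min? counts (fun y => y)).bind (fun m =>
    (PySem.List.index? counts m).map (fun k => (k : Int)))

-- ===== PRECONDITION & SPEC =====
def Spec_find_min_zeros (image : List Int) (out : Option Int) : Prop := out = find_min_zeros_alt image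
instance (image : List Int) (out : Option Int) : Decidable (Spec_find_min_zeros image out) := by unfold Spec_find_min_zeros; infer_instance

-- ===== CLAIM (what is proved, stated in full; the proofs are below) =====
def Claim_equal_find_min_zeros : Prop := ∀ (image : List Int), Dom_find_min_zeros image → Spec_find_min_zeros image (find_min_zeros image)

-- ===== LEMMAS AND PROOFS =====

-- zero count of layer j (as both programs compute it)
def layerZeros (image : List Int) (j : Nat) : Int :=
  ((((image.drop (150 * j)).take 150).count 0 : Nat) : Int)

-- first-strict-improvement argmin under initial bound m (models A's tracking loop)
def argminU : List Int → Int → Option Nat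
  | [], _ => none
  | x :: xs, m =>
    if x < m then
      match argminU xs x with
      | none => some 0
      | some j => some (j + 1)
    else (argminU xs m).map (· + 1)

theorem foldl_min_le (l : List Int) : ∀ a : Int, l.foldl min a ≤ a := by
  induction l with
  | nil => intro a; simp
  | cons x xs ih =>
    intro a
    calc (x :: xs).foldl min a = xs.foldl min (min a x) := rfl
      _ ≤ min a x := ih _
      _ ≤ a := min_le_left _ _

theorem foldl_min_mem (l : List Int) : ∀ a : Int, l.foldl min a = a ∨ l.foldl min a ∈ l := by
  induction l with
  | nil => intro a; simp
  | cons x xs ih =>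
    intro a
    rcases ih (min a x) with h | h
    · rcases le_total a x with hax | hxa
      · left; simpa [min_eq_left hax] using h
      · right
        rw [List.foldl_cons, h, min_eq_right hxa]
        exact List.mem_cons_self
    · right; exact List.mem_cons_of_mem _ h

theorem argminU_eq (l : List Int) : ∀ m : Int,
    argminU l m = if l.foldl min m < m then some (l.idxOf (l.foldl min m)) else none := by
  induction l with
  | nil => intro m; simp [argminU]
  | cons x xs ih =>
    intro m
    have hfold : (x :: xs).foldl min m = xs.foldl min (min m x) := rfl
    by_cases hx : x < m
    · have hM : (x :: xs).foldl min m = xs.foldl min x := by rw [hfold, min_eq_right hx.le]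
      rw [argminU, if_pos hx, ih x]
      by_cases hlt : xs.foldl min x < x
      · have hbeq : (x == xs.foldl min x) = false := by
          simp only [beq_eq_false_iff_ne]; omega
        rw [if_pos hlt, hM, if_pos (lt_trans hlt hx), List.idxOf_cons, hbeq]
        rfl
      · have hxeq : xs.foldl min x = x := le_antisymm (foldl_min_le xs x) (by omega)
        rw [if_neg hlt, hM, hxeq, if_pos hx, List.idxOf_cons_self]
    · have hM : (x :: xs).foldl min m = xs.foldl min m := by rw [hfold, min_eq_left (by omega)]
      rw [argminU, if_neg hx, ih m]
      by_cases hlt : xs.foldl min m < m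
      · have hbeq : (x == xs.foldl min m) = false := by
          simp only [beq_eq_false_iff_ne]; omega
        rw [if_pos hlt, hM, if_pos hlt, List.idxOf_cons, hbeq]
        rfl
      · rw [if_neg hlt, hM, if_neg hlt]
        rfl

-- A's count helper at a natural layer index computes layerZeros
theorem countHelper_eq (image : List Int) (k : Nat) :
    countHelper image (k : Int) 0 = layerZeros image k := by
  unfold countHelper layerZeros
  have h1 : (k : Int) * 25 * 6 = ((150 * k : Nat) : Int) := by push_cast; ring
  have h2 : ((k : Int) + 1) * 25 * 6 = ((150 * k + 150 : Nat) : Int) := by push_cast; ring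
  rw [h1, h2, PySem.List.slice_natCast]
  have h3 : 150 * k + 150 - 150 * k = 150 := by omega
  rw [h3, PySem.List.foldl_beq_add_one]
  simp

-- A's tracking loop over range [k, k+n) in terms of argminU on the layer counts
theorem aloop (image : List Int) : ∀ (n k : Nat) (m : Int) (idx : Option Int),
    (PySem.List.pyRange (k : Int) ((k : Int) + (n : Int)) 1).foldl
      (fun (s : Int × Option Int) i =>
        let zeros := countHelper image i 0
        if zeros < s.1 then (zeros, some i) else s) (m, idx)
    = (((List.range n).map (fun t => layerZeros image (k + t))).foldl min m,
       (argminU ((List.range n).map (fun t => layerZeros image (k + t))) m).elim idx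
         (fun j => some ((k + j : Nat) : Int))) := by
  intro n
  induction n with
  | zero =>
    intro k m idx
    rw [show ((k : Int) + ((0 : Nat) : Int)) = (k : Int) by push_cast; ring,
      PySem.List.pyRange_one_eq_nil (by omega)]
    rfl
  | succ n ih =>
    intro k m idx
    have hcons : PySem.List.pyRange (k : Int) ((k : Int) + ((n + 1 : Nat) : Int)) 1
        = (k : Int) :: PySem.List.pyRange ((k + 1 : Nat) : Int) (((k + 1 : Nat) : Int) + (n : Int)) 1 := by
      rw [PySem.List.pyRange_one_cons (by push_cast; omega)]
      congr 1 ; push_cast ; ring_nf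
    rw [hcons]
    have hrange : (List.range (n + 1)).map (fun t => layerZeros image (k + t))
        = layerZeros image k :: (List.range n).map (fun t => layerZeros image (k + 1 + t)) := by
      rw [List.range_succ_eq_map]
      simp only [List.map_cons, List.map_map]
      exact congrArg₂ (· :: ·) (congrArg (layerZeros image) (by omega))
        (List.map_congr_left fun t _ => congrArg (layerZeros image) (by omega))
    rw [hrange]
    simp only [List.foldl_cons, countHelper_eq image k]
    by_cases hlt : layerZeros image k < m
    · rw [if_pos hlt, ih (k + 1) (layerZeros image k) (some (k : Int))]
      rw [show min m (layerZeros image k) = layerZeros image k from min_eq_right hlt.le]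
      refine Prod.ext rfl ?_
      rw [argminU, if_pos hlt]
      rcases argminU ((List.range n).map (fun t => layerZeros image (k + 1 + t))) (layerZeros image k) with _ | j
      · simp
      · simp only [Option.elim_some, Option.some.injEq]
        push_cast; ring
    · rw [if_neg hlt, ih (k + 1) m idx]
      rw [show min m (layerZeros image k) = m from min_eq_left (by omega)]
      refine Prod.ext rfl ?_
      rw [argminU, if_neg hlt]
      rcases argminU ((List.range n).map (fun t => layerZeros image (k + 1 + t))) m with _ | j
      · simp
      · simp only [Option.map_some, Option.elim_some, Option.some.injEq]
        push_cast; ring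

-- ===== B-side lemmas: the flat pass builds the layer-count table =====

def bCond (j : Nat) (p : Int × Int) : Bool :=
  decide (PySem.Int.floordiv p.1 150 = (j : Int) ∧ p.2 = 0)

theorem stepB_length (ps : List (Int × Int)) : ∀ cs : List Int,
    (ps.foldl stepB cs).length = cs.length := by
  induction ps with
  | nil => intro cs; rfl
  | cons p ps ih =>
    intro cs
    rw [List.foldl_cons, ih]
    unfold stepB
    simp only []
    split_ifs with h
    · exact List.length_set ..
    · rfl

theorem stepB_getD (j : Nat) (hj : j < 100) : ∀ (ps : List (Int × Int)) (cs : List Int),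
    cs.length = 100 → (∀ p ∈ ps, 0 ≤ p.1) →
    (ps.foldl stepB cs).getD j 0
      = cs.getD j 0 + ((ps.filter (bCond j)).length : Int) := by
  intro ps
  induction ps with
  | nil => intro cs _ _; simp
  | cons p ps ih =>
    intro cs hlen hpos
    have hp : 0 ≤ p.1 := hpos p List.mem_cons_self
    have hps : ∀ q ∈ ps, 0 ≤ q.1 := fun q hq => hpos q (List.mem_cons_of_mem _ hq)
    rw [List.foldl_cons, List.filter_cons]
    by_cases hg : PySem.Int.floordiv p.1 150 < 100 ∧ p.2 = 0
    · have hset : stepB cs p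
          = cs.set (PySem.Int.floordiv p.1 150).toNat
              (cs.getD (PySem.Int.floordiv p.1 150).toNat 0 + 1) := by
        unfold stepB; rw [if_pos hg]
      have hL0 : 0 ≤ PySem.Int.floordiv p.1 150 := by
        rw [PySem.Int.floordiv_eq_ediv_of_pos (by norm_num)]
        exact Int.ediv_nonneg hp (by norm_num)
      by_cases hjl : (PySem.Int.floordiv p.1 150).toNat = j
      · have hLj : PySem.Int.floordiv p.1 150 = (j : Int) := by omega
        have hc : bCond j p = true := by
          unfold bCond; exact decide_eq_true ⟨hLj, hg.2⟩
        rw [hc, if_pos rfl]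
        rw [ih (stepB cs p) (by rw [hset]; exact (List.length_set ..).trans hlen) hps]
        have hgd : (stepB cs p).getD j 0 = cs.getD j 0 + 1 := by
          rw [hset, hjl]
          have hjlt : j < cs.length := by omega
          rw [List.getD_eq_getElem _ _ (by simpa using hjlt),
              List.getElem_set_self, List.getD_eq_getElem _ _ hjlt]
        rw [hgd]
        simp only [List.length_cons]
        push_cast; ring
      · have hc : bCond j p = false := by
          unfold bCond
          apply decide_eq_false
          rintro ⟨h1, _⟩
          omega
        rw [hc, if_neg (by simp)]
        rw [ih (stepB cs p) (by rw [hset]; exact (List.length_set ..).trans hlen) hps]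
        have hgd : (stepB cs p).getD j 0 = cs.getD j 0 := by
          rw [hset]
          by_cases hjlt : j < cs.length
          · rw [List.getD_eq_getElem _ _ (by simpa using hjlt),
                List.getElem_set_ne (by omega), List.getD_eq_getElem _ _ hjlt]
          · rw [List.getD_eq_default _ _ (by simpa using le_of_not_gt hjlt),
                List.getD_eq_default _ _ (le_of_not_gt hjlt)]
        rw [hgd]
    · have hstep : stepB cs p = cs := by unfold stepB; rw [if_neg hg]
      have hc : bCond j p = false := by
        unfold bCond
        apply decide_eq_false
        rintro ⟨h1, h2⟩
        exact hg ⟨by rw [h1]; exact_mod_cast Int.ofNat_lt.mpr hj, h2⟩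
      rw [hc, if_neg (by simp), hstep, ih cs hlen hps]

-- counting zeros through enumerate: the index plays no role once the condition is only on the value
theorem filt_snd (m : List Int) : ∀ s : Int,
    ((PySem.List.enumerate m s).filter (fun p => decide (p.2 = 0))).length = m.count 0 := by
  induction m with
  | nil => intro s; simp [PySem.List.enumerate_nil]
  | cons x xs ih =>
    intro s
    rw [PySem.List.enumerate_cons, List.filter_cons]
    by_cases hx : x = 0
    · rw [if_pos (by simpa using hx)]
      simp [ih (s + 1), hx]
    · rw [if_neg (by simpa using hx)]
      simp [ih (s + 1), hx]

theorem filt_enumerate (image : List Int) (j : Nat) :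
    ((((PySem.List.enumerate image 0).filter (bCond j)).length : Nat) : Int)
      = layerZeros image j := by
  have hsplit : image = image.take (150 * j)
      ++ ((image.drop (150 * j)).take 150 ++ image.drop (150 * j + 150)) := by
    have hdd : image.drop (150 * j + 150) = (image.drop (150 * j)).drop 150 := by
      rw [List.drop_drop, Nat.add_comm]
    rw [hdd, List.take_append_drop, List.take_append_drop]
  conv_lhs => rw [hsplit]
  rw [PySem.List.enumerate_append, PySem.List.enumerate_append,
      List.filter_append, List.filter_append, List.length_append, List.length_append]
  -- part 1: indices below 150*j never reach layer j
  have h1 : (PySem.List.enumerate (image.take (150 * j)) 0).filter (bCond j) = [] := by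
    rw [List.filter_eq_nil_iff]
    intro p hp
    rcases (PySem.List.mem_enumerate_iff _ _ _).mp hp with ⟨k, hk, rfl⟩
    have hk' : k < 150 * j := lt_of_lt_of_le hk (by simp)
    unfold bCond
    simp only [decide_eq_true_eq, zero_add, not_and]
    intro h1 _
    rw [PySem.Int.floordiv_eq_ediv_of_pos (by norm_num)] at h1
    omega
  by_cases hbig : 150 * j < image.length
  · -- the layer window is at offset exactly 150*j
    have ht : (image.take (150 * j)).length = 150 * j := by
      simp [Nat.min_eq_left (le_of_lt hbig)]
    -- part 2: inside the window the condition is exactly `value = 0`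
    have h2 : (PySem.List.enumerate ((image.drop (150 * j)).take 150) ((0 : Int) + (image.take (150 * j)).length)).filter (bCond j)
        = (PySem.List.enumerate ((image.drop (150 * j)).take 150) ((0 : Int) + (image.take (150 * j)).length)).filter (fun p => decide (p.2 = 0)) := by
      apply List.filter_congr
      intro p hp
      rcases (PySem.List.mem_enumerate_iff _ _ _).mp hp with ⟨k, hk, rfl⟩
      have hk' : k < 150 := lt_of_lt_of_le hk (by simp)
      have hidx : (0 : Int) + (image.take (150 * j)).length + k = ((150 * j + k : Nat) : Int) := by
        rw [ht]; push_cast; ring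
      have hF : PySem.Int.floordiv ((0 : Int) + (image.take (150 * j)).length + k) 150 = (j : Int) := by
        rw [hidx, PySem.Int.floordiv_eq_ediv_of_pos (by norm_num)]
        omega
      simp only [bCond, decide_eq_decide]
      constructor
      · rintro ⟨_, h⟩; exact h
      · intro h; exact ⟨hF, h⟩
    -- part 3: indices at or beyond 150*j+150 never reach layer j
    have h3 : (PySem.List.enumerate (image.drop (150 * j + 150))
          (((0 : Int) + (image.take (150 * j)).length) + ((image.drop (150 * j)).take 150).length)).filter (bCond j) = [] := by
      rw [List.filter_eq_nil_iff]
      intro p hp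
      rcases (PySem.List.mem_enumerate_iff _ _ _).mp hp with ⟨k, hk, rfl⟩
      have hlen3 : 150 * j + 150 < image.length := by
        have : k < image.length - (150 * j + 150) := by simpa using hk
        omega
      have hm' : ((image.drop (150 * j)).take 150).length = 150 := by
        simp; omega
      have hidx : ((0 : Int) + (image.take (150 * j)).length) + ((image.drop (150 * j)).take 150).length + k
          = ((150 * j + 150 + k : Nat) : Int) := by
        rw [ht, hm']; push_cast; ring
      unfold bCond
      simp only [decide_eq_true_eq, not_and]
      intro h1 _
      rw [hidx, PySem.Int.floordiv_eq_ediv_of_pos (by norm_num)] at h1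
      omega
    rw [h1, h2, h3, filt_snd]
    simp [layerZeros]
  · -- the image ends before layer j starts: window empty, count 0
    have hbig' : image.length ≤ 150 * j := le_of_not_gt hbig
    have hm : (image.drop (150 * j)).take 150 = ([] : List Int) := by
      rw [List.drop_eq_nil_of_le hbig']; rfl
    have hr : image.drop (150 * j + 150) = ([] : List Int) :=
      List.drop_eq_nil_of_le (by omega)
    rw [h1, hm, hr]
    simp [PySem.List.enumerate_nil, layerZeros, List.drop_eq_nil_of_le hbig']

-- the flat pass builds exactly the per-layer zero counts
theorem countsEq (image : List Int) :
    (PySem.List.enumerate image 0).foldl stepB (List.replicate 100 (0 : Int))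
      = (List.range 100).map (fun j => layerZeros image j) := by
  have hlen : ((PySem.List.enumerate image 0).foldl stepB (List.replicate 100 (0 : Int))).length = 100 := by
    rw [stepB_length]; simp
  apply List.ext_getElem
  · rw [hlen]; simp
  · intro i hi1 hi2
    have hi : i < 100 := by rwa [hlen] at hi1
    have hpos : ∀ p ∈ PySem.List.enumerate image 0, 0 ≤ p.1 := by
      intro p hp
      rcases (PySem.List.mem_enumerate_iff _ _ _).mp hp with ⟨k, _, rfl⟩
      simp
    have h := stepB_getD i hi (PySem.List.enumerate image 0) (List.replicate 100 (0 : Int)) (by simp) hpos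
    rw [List.getD_eq_getElem _ _ (by rw [hlen]; exact hi),
        List.getD_eq_getElem _ _ (by simp [hi])] at h
    rw [h]
    rw [List.getElem_replicate, List.getElem_map, List.getElem_range]
    rw [← filt_enumerate image i]
    ring

-- ===== selection lemmas (shared) =====

theorem index?_of_mem (cs : List Int) (v : Int) (h : v ∈ cs) :
    PySem.List.index? cs v = some (cs.idxOf v) := by
  induction cs with
  | nil => cases h
  | cons x xs ih =>
    by_cases hx : x = v
    · subst hx
      rw [PySem.List.index?_cons_self x xs, List.idxOf_cons_self]
    · have hbeq : (x == v) = false := by simp [hx]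
      have hv : v ∈ xs := by
        rcases List.mem_cons.mp h with h' | h'
        · exact absurd h'.symm hx
        · exact h'
      rw [PySem.List.index?_cons_of_ne xs hx, ih hv, Option.map_some, List.idxOf_cons, hbeq]
      rfl

-- selection step: A's argminU-result equals B's min+index on a nonempty bounded counts list
theorem select_eq (cs : List Int) (c0 : Int) (rest : List Int) (hcs : cs = c0 :: rest)
    (hb : c0 < 15000) :
    (argminU cs 15000).elim (none : Option Int) (fun j => some (j : Int))
    = (PySem.List.min? cs (fun y => y)).bind (fun m =>
        (PySem.List.index? cs m).map (fun k => (k : Int))) := by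
  subst hcs
  have hM : (c0 :: rest).foldl min 15000 = rest.foldl min c0 := by
    rw [List.foldl_cons, min_eq_right hb.le]
  have hlt : (c0 :: rest).foldl min 15000 < 15000 := by
    rw [hM]
    have := foldl_min_le rest c0
    omega
  have hmem : rest.foldl min c0 ∈ c0 :: rest := by
    rcases foldl_min_mem rest c0 with h | h
    · rw [h]; exact List.mem_cons_self
    · exact List.mem_cons_of_mem _ h
  rw [argminU_eq, if_pos hlt, hM, PySem.List.min?_id_cons, Option.bind_some,
    index?_of_mem _ _ hmem]
  rfl

-- ===== VERDICT (by name: the statement is the Claim_ definition above) =====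
set_option maxRecDepth 8192 in
theorem find_min_zeros_spec : Claim_equal_find_min_zeros := by
  intro image _
  unfold Spec_find_min_zeros find_min_zeros find_min_zeros_alt
  have hA := aloop image 100 0 15000 none
  simp only [Nat.zero_add] at hA
  rw [show (((0 : Nat) : Int)) = (0 : Int) from rfl,
    show ((0 : Int) + ((100 : Nat) : Int)) = (100 : Int) from by norm_num] at hA
  rw [show ((25 : Int) * 6 * 100) = 15000 from by norm_num, hA, countsEq image]
  have hb0 : layerZeros image 0 < 15000 := by
    unfold layerZeros
    have h1 : ((image.drop (150 * 0)).take 150).count 0 ≤ ((image.drop (150 * 0)).take 150).length :=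
      List.count_le_length
    have h2 : ((image.drop (150 * 0)).take 150).length ≤ 150 := by
      simp
    omega
  have hcs : (List.range 100).map (fun t => layerZeros image t)
      = layerZeros image 0 :: (List.range 99).map (fun t => layerZeros image (t + 1)) := by
    rw [show (100 : Nat) = 99 + 1 from rfl, List.range_succ_eq_map, List.map_cons, List.map_map]
    exact congrArg₂ (· :: ·) rfl (List.map_congr_left fun t _ => rfl)
  generalize hg : (List.range 100).map (fun t => layerZeros image t) = cs
  rw [hcs] at hg
  exact select_eq cs (layerZeros image 0)
    ((List.range 99).map (fun t => layerZeros image (t + 1))) hg.symm hb0
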